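-- pv_equiv track=rewrite | github.com/yarloz-old/algorithms_training_from_yandex | hw3/3_F.py | compare_genomes
-- ===== SOURCE A (Python) =====
-- def compare_genomes(g1, g2):
--     count_dict = {}
--     for i in range(len(g1) - 1):
--         pair = g1[i:i+2]
--         if pair not in count_dict.keys():
--             count_dict[pair] = 0
--         if pair in count_dict.keys():
--             count_dict[pair] += 1
--     count = 0
--     for i in range(len(g2) - 1):
--         pair = g2[i:i + 2]
--         if pair in count_dict.keys():
--             count += count_dict[pair]
--             del count_dict[pair]
--
--     return count
-- ===== SOURCE B (Python) =====
-- def compare_genomes(g1, g2):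
--     return sum(1 for i in range(len(g1) - 1) if g1[i:i+2] in g2)
-- ===== Notes on version B (the rewrite author's own statement) =====
-- stated objective: simpler
-- what changed: B drops A's whole counting machinery (bigram dict built over g1, then a stateful delete-as-you-go scan of g2): it makes one pass over g1's bigram positions and adds 1 whenever that bigram occurs as a substring of g2 -- correct because a length-2 substring of g2 is exactly a bigram of g2, and counting g1 positions whose bigram is shared equals summing g1-counts over the distinct shared bigrams.
import Mathlib
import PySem

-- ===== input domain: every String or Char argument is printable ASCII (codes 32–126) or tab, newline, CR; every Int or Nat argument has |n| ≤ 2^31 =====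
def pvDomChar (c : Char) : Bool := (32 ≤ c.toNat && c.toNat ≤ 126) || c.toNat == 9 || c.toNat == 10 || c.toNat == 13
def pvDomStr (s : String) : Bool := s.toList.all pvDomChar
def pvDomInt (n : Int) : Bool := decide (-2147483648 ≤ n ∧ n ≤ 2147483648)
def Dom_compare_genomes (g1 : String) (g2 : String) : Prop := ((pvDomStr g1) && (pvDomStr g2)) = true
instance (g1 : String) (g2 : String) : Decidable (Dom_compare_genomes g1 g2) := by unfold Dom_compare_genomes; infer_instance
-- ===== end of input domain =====

-- B discards A's dict-and-delete counting machinery entirely: it scans g1's bigram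
-- positions once and adds 1 whenever that bigram occurs as a substring of g2 (simpler; same return value, proved below).


-- ===== PORT A =====
-- first loop body: if pair not in keys: d[pair] = 0; if pair in keys: d[pair] += 1
def cgStepA (count_dict : PySem.Dict String Int) (pair : String) : PySem.Dict String Int :=
  let count_dict := if !count_dict.contains pair then count_dict.insert pair 0 else count_dict
  if count_dict.contains pair then count_dict.modify pair 0 (fun v => v + 1) else count_dict

-- second loop body over state (count, count_dict): if pair in keys: count += d[pair]; del d[pair]
def cgStep2 (st : Int × PySem.Dict String Int) (pair : String) : Int × PySem.Dict String Int :=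
  if st.2.contains pair then (st.1 + st.2.getD pair 0, st.2.erase pair) else st

def compare_genomes (g1 : String) (g2 : String) : Int :=
  let count_dict : PySem.Dict String Int :=
    (PySem.List.pyRange 0 (PySem.Str.len g1 - 1) 1).foldl
      (fun count_dict i => cgStepA count_dict (PySem.Str.slice g1 (some i) (some (i + 2))))
      PySem.Dict.empty
  let st :=
    (PySem.List.pyRange 0 (PySem.Str.len g2 - 1) 1).foldl
      (fun st i => cgStep2 st (PySem.Str.slice g2 (some i) (some (i + 2))))
      ((0 : Int), count_dict)
  st.1

-- ===== PORT B =====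
-- sum(1 for i in range(len(g1) - 1) if g1[i:i+2] in g2)
def compare_genomes_alt (g1 : String) (g2 : String) : Int :=
  ((PySem.List.pyRange 0 (PySem.Str.len g1 - 1) 1).map
    (fun i => if PySem.Str.isIn (PySem.Str.slice g1 (some i) (some (i + 2))) g2 then (1 : Int) else 0)).sum

-- ===== PRECONDITION & SPEC =====
def Spec_compare_genomes (g1 : String) (g2 : String) (out : Int) : Prop := out = compare_genomes_alt g1 g2
instance (g1 : String) (g2 : String) (out : Int) : Decidable (Spec_compare_genomes g1 g2 out) := by unfold Spec_compare_genomes; infer_instance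

-- ===== CLAIM (what is proved, stated in full; the proofs are below) =====
def Claim_equal_compare_genomes : Prop := ∀ (g1 : String) (g2 : String), Dom_compare_genomes g1 g2 → Spec_compare_genomes g1 g2 (compare_genomes g1 g2)

-- ===== LEMMAS AND PROOFS =====

-- the list of bigrams of g, in order (as Strings, the values both ports slice out)
def cgBigrams (g : String) : List String :=
  (PySem.List.pyRange 0 (PySem.Str.len g - 1) 1).map
    (fun i => PySem.Str.slice g (some i) (some (i + 2)))

-- the same windows on the character-list side, structurally
def cgWin2 : List Char → List (List Char)
  | a :: b :: t => [a, b] :: cgWin2 (b :: t)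
  | _ => []

lemma cgWin2_eq_map_range (l : List Char) :
    cgWin2 l = (List.range (l.length - 1)).map (fun k => (l.drop k).take 2) := by
  induction l with
  | nil => rfl
  | cons a t ih =>
    cases t with
    | nil => rfl
    | cons b t' =>
      simp only [cgWin2, ih]
      simp [List.range_succ_eq_map, List.map_map, Function.comp_def]

lemma cgWin2_shape {p : List Char} {l : List Char} (h : p ∈ cgWin2 l) :
    ∃ a b, p = [a, b] := by
  induction l with
  | nil => cases h
  | cons a t ih =>
    cases t with
    | nil => cases h
    | cons b t' =>
      simp only [cgWin2, List.mem_cons] at h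
      rcases h with h | h
      · exact ⟨a, b, h⟩
      · exact ih h

lemma cgWin2_infix (a b : Char) (l : List Char) :
    [a, b] <:+: l ↔ [a, b] ∈ cgWin2 l := by
  induction l with
  | nil =>
    simp [cgWin2]
  | cons x t ih =>
    cases t with
    | nil =>
      constructor
      · intro h
        have := h.length_le
        simp at this
      · intro h; cases h
    | cons y t' =>
      rw [List.infix_cons_iff]
      simp only [cgWin2, List.mem_cons]
      constructor
      · rintro (hp | hi)
        · left
          rw [List.cons_prefix_cons, List.cons_prefix_cons] at hp
          obtain ⟨hax, hby, -⟩ := hp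
          rw [hax, hby]
        · right; exact ih.mp hi
      · rintro (he | hm)
        · left
          rw [he]
          exact ⟨t', rfl⟩
        · right; exact ih.mpr hm

-- the string bigrams map, char by char, to the structural windows
lemma cgBigrams_map_toList (g : String) :
    (cgBigrams g).map String.toList = cgWin2 g.toList := by
  unfold cgBigrams
  rw [cgWin2_eq_map_range, List.map_map]
  rw [PySem.List.pyRange_one 0 ((PySem.Str.len g) - 1), List.map_map]
  have hlen : ((PySem.Str.len g - 1) - 0).toNat = g.toList.length - 1 := by
    simp [PySem.Str.len]
  rw [hlen]
  apply List.map_congr_left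
  intro k _
  simp only [Function.comp_def, zero_add]
  have : (PySem.Str.slice g (some (k : Int)) (some ((k : Int) + 2))).toList
      = PySem.List.slice g.toList (some (k : Int)) (some ((k : Int) + 2)) := by
    simp [PySem.Str.slice]
  rw [this, PySem.List.slice_toNat g.toList (by positivity) (by positivity)]
  congr 1
  omega

lemma cgBigrams_mem_iff_win2 (p : String) (g : String) :
    p ∈ cgBigrams g ↔ p.toList ∈ cgWin2 g.toList := by
  rw [← cgBigrams_map_toList]
  constructor
  · exact fun h => List.mem_map_of_mem h
  · intro h
    obtain ⟨q, hq, he⟩ := List.mem_map.mp h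
    have : q = p := by
      apply String.toList_injective he
    exact this ▸ hq

-- for a bigram of g1, ''p in g2'' is exactly ''p is a bigram of g2''
lemma cg_isIn_iff_mem (p : String) (g1 g2 : String) (hp : p ∈ cgBigrams g1) :
    PySem.Str.isIn p g2 = true ↔ p ∈ cgBigrams g2 := by
  obtain ⟨a, b, hab⟩ := cgWin2_shape ((cgBigrams_mem_iff_win2 p g1).mp hp)
  rw [PySem.Str.isIn_iff_infix, cgBigrams_mem_iff_win2, hab, cgWin2_infix]

-- ===== A-side characterisation (dict counting, then delete-as-you-sum) =====
lemma cg_find?_filter_ne (items : List (String × Int)) (k p : String) (h : p ≠ k) :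
    (items.filter (fun q => !(q.1 == k))).find? (fun q => q.1 == p)
      = items.find? (fun q => q.1 == p) := by
  induction items with
  | nil => rfl
  | cons a t ih =>
    by_cases hk : a.1 = k
    · subst hk
      simp [Ne.symm h, ih]
    · by_cases hp : a.1 = p
      · simp [hp, h]
      · simp [hk, hp, ih]

lemma cg_get?_erase (d : PySem.Dict String Int) (k p : String) :
    (d.erase k).get? p = if p = k then none else d.get? p := by
  split_ifs with h
  · subst h
    simp only [PySem.Dict.erase, PySem.Dict.get?]
    rw [List.find?_eq_none.mpr]
    · rfl
    · intro q hq
      simp only [List.mem_filter] at hq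
      simpa using hq.2
  · simp only [PySem.Dict.erase, PySem.Dict.get?]
    rw [cg_find?_filter_ne d.items k p h]

lemma cg_getD_erase (d : PySem.Dict String Int) (k p : String) :
    (d.erase k).getD p 0 = if p = k then 0 else d.getD p 0 := by
  simp only [PySem.Dict.getD, cg_get?_erase]
  split_ifs <;> rfl

lemma cg_getD_of_not_contains (d : PySem.Dict String Int) (p : String)
    (h : d.contains p = false) : d.getD p 0 = 0 := by
  exact PySem.Dict.getD_of_not_contains d 0 h

-- one step of A's counting loop, pointwise
lemma cgStepA_getD (d : PySem.Dict String Int) (q p : String) :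
    (cgStepA d q).getD p 0 = d.getD p 0 + (if p = q then 1 else 0) := by
  unfold cgStepA
  by_cases hc : d.contains q
  · simp only [hc, Bool.not_true, Bool.false_eq_true, if_false, if_true,
      PySem.Dict.getD_modify]
    split_ifs with h
    · subst h; ring
    · ring
  · simp only [Bool.not_eq_true] at hc
    simp only [hc, Bool.not_false, if_true, PySem.Dict.contains_insert_self,
      PySem.Dict.getD_modify, PySem.Dict.getD_insert]
    split_ifs with h
    · subst h
      rw [cg_getD_of_not_contains d p hc]
    · ring

-- A's counting loop computes bigram counts
lemma cg_foldl_stepA_getD (l : List String) (d : PySem.Dict String Int) (p : String) :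
    (l.foldl cgStepA d).getD p 0 = d.getD p 0 + l.count p := by
  induction l generalizing d with
  | nil => simp
  | cons q t ih =>
    simp only [List.foldl_cons, ih, cgStepA_getD, List.count_cons]
    by_cases h : p = q
    · subst h; push_cast; simp; ring
    · simp [h, Ne.symm h]

-- A's second loop totals d's counts over the distinct elements of l
lemma cg_foldl_step2 (l : List String) (c : Int) (d : PySem.Dict String Int) :
    (l.foldl cgStep2 (c, d)).1 = c + ∑ p ∈ l.toFinset, d.getD p 0 := by
  induction l generalizing c d with
  | nil => simp
  | cons q t ih =>
    simp only [List.foldl_cons, List.toFinset_cons]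
    by_cases hq : d.contains q
    · simp only [cgStep2, hq, if_true]
      rw [ih]
      have herase : ∀ p ∈ t.toFinset.erase q, (d.erase q).getD p 0 = d.getD p 0 := by
        intro p hp
        rw [cg_getD_erase]
        simp [Finset.ne_of_mem_erase hp]
      have h0 : (d.erase q).getD q 0 = 0 := by rw [cg_getD_erase]; simp
      rw [← Finset.sum_erase t.toFinset h0, Finset.sum_congr rfl herase]
      rw [← Finset.add_sum_erase _ _ (Finset.mem_insert_self q t.toFinset),
          Finset.erase_insert_eq_erase]
      ring
    · simp only [Bool.not_eq_true] at hq
      simp only [cgStep2, hq, Bool.false_eq_true, if_false]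
      rw [ih]
      have h0 : d.getD q 0 = 0 := cg_getD_of_not_contains d q hq
      rw [← Finset.add_sum_erase _ _ (Finset.mem_insert_self q t.toFinset),
          Finset.erase_insert_eq_erase, h0, zero_add,
          Finset.sum_erase t.toFinset h0]

lemma cgA_eq (g1 g2 : String) :
    compare_genomes g1 g2
      = ∑ p ∈ (cgBigrams g2).toFinset, ((cgBigrams g1).count p : Int) := by
  unfold compare_genomes
  simp only [cgBigrams, ← List.foldl_map]
  rw [cg_foldl_step2, zero_add]
  apply Finset.sum_congr rfl
  intro p _
  rw [cg_foldl_stepA_getD]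
  simp

-- ===== B-side characterisation: a 0/1 sum over g1's bigrams =====
lemma cgB_eq (g1 g2 : String) :
    compare_genomes_alt g1 g2
      = ((cgBigrams g1).map
          (fun p => if PySem.Str.isIn p g2 then (1 : Int) else 0)).sum := by
  unfold compare_genomes_alt cgBigrams
  rw [List.map_map]
  rfl

-- the 0/1 membership sum equals the sum of counts over the distinct members
lemma cg_count_sum (l1 l2 : List String) :
    ((l1.map (fun p => if p ∈ l2 then (1 : Int) else 0)).sum)
      = ∑ p ∈ l2.toFinset, (l1.count p : Int) := by
  induction l1 with
  | nil => simp
  | cons a t ih =>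
    rw [List.map_cons, List.sum_cons, ih]
    have hsplit : ∀ p : String, (((a :: t).count p : Int))
        = (t.count p : Int) + (if p = a then 1 else 0) := by
      intro p
      by_cases h : p = a
      · subst h; simp
      · simp [h, Ne.symm h]
    rw [Finset.sum_congr rfl (fun p _ => hsplit p), Finset.sum_add_distrib,
        Finset.sum_ite_eq' l2.toFinset a (fun _ => (1 : Int))]
    by_cases h : a ∈ l2 <;> simp [h, add_comm]

-- ===== VERDICT (by name: the statement is the Claim_ definition above) =====
theorem compare_genomes_spec : Claim_equal_compare_genomes := by
  intro g1 g2 _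
  show compare_genomes g1 g2 = compare_genomes_alt g1 g2
  rw [cgA_eq, cgB_eq, ← cg_count_sum (cgBigrams g1) (cgBigrams g2)]
  congr 1
  apply List.map_congr_left
  intro p hp
  simp only [cg_isIn_iff_mem p g1 g2 hp]
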